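-- pv_equiv track=rewrite | github.com/crispitagorico/sigkernel | src_distribution_regression/sklearn_transformers.py | transform_instance_1D
-- ===== SOURCE A (Python) =====
-- def transform_instance_1D(x):
--
--     lag = []
--     lead = []
--
--     for val_lag, val_lead in zip(x[:-1], x[1:]):
--         lag.append(val_lag)
--         lead.append(val_lag)
--         lag.append(val_lag)
--         lead.append(val_lead)
--
--     lag.append(x[-1])
--     lead.append(x[-1])
--
--     return lead, lag
-- ===== SOURCE B (Python) =====
-- def transform_instance_1D(x):
--     doubled = [v for val in x for v in (val, val)]
--     return doubled[1:], doubled[:-1]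
-- ===== Notes on version B (the rewrite author's own statement) =====
-- stated objective: simpler
-- what changed: Replaces the interleaved four-append zip loop with one doubling pass plus two slices (lead = doubled[1:], lag = doubled[:-1]).
import Mathlib
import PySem

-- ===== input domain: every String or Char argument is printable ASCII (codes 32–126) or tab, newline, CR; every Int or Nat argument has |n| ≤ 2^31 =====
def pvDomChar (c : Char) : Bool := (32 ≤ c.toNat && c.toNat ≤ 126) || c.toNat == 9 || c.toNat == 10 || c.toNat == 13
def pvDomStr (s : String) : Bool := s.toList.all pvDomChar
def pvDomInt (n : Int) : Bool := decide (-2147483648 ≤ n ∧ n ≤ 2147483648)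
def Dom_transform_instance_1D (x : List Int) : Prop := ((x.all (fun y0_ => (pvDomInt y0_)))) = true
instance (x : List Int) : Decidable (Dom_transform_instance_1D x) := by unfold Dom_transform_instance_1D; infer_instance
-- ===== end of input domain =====

-- B builds the doubled list once and slices it, instead of A's interleaved four-append loop: simpler decomposition.
-- Return-value equivalence only; neither version mutates x.
-- ===== PORT A =====
def transform_instance_1D (x : List Int) : List Int × List Int :=
  let pairs := List.zip (PySem.List.slice x none (some (-1))) (PySem.List.slice x (some 1) none)
  let s := pairs.foldl (fun (acc : List Int × List Int) p =>
      (acc.1 ++ [p.1, p.1], acc.2 ++ [p.1, p.2])) ([], [])   -- (lag, lead)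
  match PySem.List.pyGet? x (-1) with
  | some last => (s.2 ++ [last], s.1 ++ [last])   -- return lead, lag
  | none => ([], [])   -- IndexError in Python; excluded by Pre_

-- ===== PORT B =====
def transform_instance_1D_alt (x : List Int) : List Int × List Int :=
  let doubled := x.flatMap (fun v => [v, v])
  (PySem.List.slice doubled (some 1) none, PySem.List.slice doubled none (some (-1)))

-- ===== PRECONDITION & SPEC =====
-- Pre_ excludes only the empty list, on which A raises IndexError at x[-1].
def Pre_transform_instance_1D (x : List Int) : Prop := x ≠ []
instance (x : List Int) : Decidable (Pre_transform_instance_1D x) := by unfold Pre_transform_instance_1D; infer_instance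
def pvWitness_transform_instance_1D : List Int := [1, 2, 3]

def Spec_transform_instance_1D (x : List Int) (out : List Int × List Int) : Prop := out = transform_instance_1D_alt x
instance (x : List Int) (out : List Int × List Int) : Decidable (Spec_transform_instance_1D x out) := by unfold Spec_transform_instance_1D; infer_instance

-- ===== CLAIM (what is proved, stated in full; the proofs are below) =====
def Claim_equal_transform_instance_1D : Prop := ∀ (x : List Int), Dom_transform_instance_1D x → Pre_transform_instance_1D x → Spec_transform_instance_1D x (transform_instance_1D x)

-- ===== LEMMAS AND PROOFS =====

-- the interleaved fold, with the accumulator pulled out front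
theorem foldl_pairs (l : List (Int × Int)) (acc : List Int × List Int) :
    l.foldl (fun (acc : List Int × List Int) p =>
      (acc.1 ++ [p.1, p.1], acc.2 ++ [p.1, p.2])) acc
    = (acc.1 ++ l.flatMap (fun p => [p.1, p.1]), acc.2 ++ l.flatMap (fun p => [p.1, p.2])) := by
  induction l generalizing acc with
  | nil => simp
  | cons h t ih => simp [List.foldl_cons, ih]

-- lead side: zip-pairs flattened plus the last element = tail of the doubled list
theorem lead_eq (x : List Int) (hx : x ≠ []) :
    (List.zip x.dropLast x.tail).flatMap (fun p => [p.1, p.2]) ++ [x.getLast hx]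
    = (x.flatMap (fun v => [v, v])).tail := by
  induction x with
  | nil => exact absurd rfl hx
  | cons a t ih =>
    cases t with
    | nil => simp
    | cons b u =>
      have h := ih (List.cons_ne_nil b u)
      simp only [List.dropLast_cons₂, List.tail_cons, List.zip_cons_cons, List.flatMap_cons,
        List.cons_append, List.append_assoc, List.nil_append] at h ⊢
      rw [show (a :: b :: u).getLast hx = (b :: u).getLast (List.cons_ne_nil b u) from
        List.getLast_cons _, h]

-- lag side: doubled zip-firsts plus the last element = dropLast of the doubled list
theorem lag_eq (x : List Int) (hx : x ≠ []) :
    (List.zip x.dropLast x.tail).flatMap (fun p => [p.1, p.1]) ++ [x.getLast hx]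
    = (x.flatMap (fun v => [v, v])).dropLast := by
  induction x with
  | nil => exact absurd rfl hx
  | cons a t ih =>
    cases t with
    | nil => simp
    | cons b u =>
      have h := ih (List.cons_ne_nil b u)
      simp only [List.dropLast_cons₂, List.tail_cons, List.zip_cons_cons, List.flatMap_cons,
        List.cons_append, List.append_assoc, List.nil_append] at h ⊢
      rw [show (a :: b :: u).getLast hx = (b :: u).getLast (List.cons_ne_nil b u) from
        List.getLast_cons _, h]

theorem pyGet_neg_one (x : List Int) (hx : x ≠ []) :
    PySem.List.pyGet? x (-1) = some (x.getLast hx) := by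
  have hl : 1 ≤ x.length := List.length_pos_iff.mpr hx
  simp [PySem.List.pyGet?, PySem.List.pyIdx?, hl, List.getLast_eq_getElem,
    List.getElem?_eq_getElem (show x.length - 1 < x.length by omega)]

-- ===== VERDICT (by name: the statement is the Claim_ definition above) =====
theorem transform_instance_1D_spec : Claim_equal_transform_instance_1D := by
  intro x _ hx
  unfold Spec_transform_instance_1D transform_instance_1D transform_instance_1D_alt
  simp only [PySem.List.slice_to_neg_one, PySem.List.slice_from_one, foldl_pairs,
    List.nil_append, pyGet_neg_one x hx]
  rw [lead_eq x hx, lag_eq x hx]
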